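-- pv_equiv track=rewrite | github.com/JasonFernandoo/Tucil1_13522156 | src/main.py | find_all_patterns
-- ===== SOURCE A (Python) =====
-- def find_all_patterns(
--     matrix: list[list[str]], step: int
-- ) -> list[list[tuple[str, tuple[int, int]]]]:
--     num_rows: int = len(matrix)
--     num_cols: int = len(matrix[0])
--     all_paths: list[list[tuple[str, tuple[int, int]]]] = []
--
--     def explore_paths(
--         current_x: int,
--         current_y: int,
--         current_path: list[tuple[str, tuple[int, int]]] = [],
--         visited_cells: set[tuple[int, int]] = set(),
--         current_direction: str = "vertical",
--         remaining_steps: int = step,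
--     ) -> None:
--         if remaining_steps == 0:
--             all_paths.append(current_path.copy())
--             return
--         if current_direction == "vertical":
--             for next_y in range(num_rows):
--                 if (current_x, next_y) not in visited_cells:
--                     explore_paths(
--                         current_x,
--                         next_y,
--                         current_path + [
--                             (matrix[next_y][current_x], (current_x, next_y))
--                         ],
--                         visited_cells | {(current_x, next_y)},
--                         "horizontal",
--                         remaining_steps - 1,
--                     )
--         else:
--             for next_x in range(num_cols):
--                 if (next_x, current_y) not in visited_cells:
--                     explore_paths(
--                         next_x,
--                         current_y,
--                         current_path + [
--                             (matrix[current_y][next_x], (next_x, current_y))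
--                         ],
--                         visited_cells | {(next_x, current_y)},
--                         "vertical",
--                         remaining_steps - 1,
--                     )
--
--     for x in range(num_cols):
--         explore_paths(
--             x,
--             0,
--             current_path=[(matrix[0][x], (x, 0))],
--             visited_cells={(x, 0)},
--             current_direction="vertical",
--             remaining_steps=step,
--         )
--
--     return all_paths
-- ===== SOURCE B (Python) =====
-- def find_all_patterns(
--     matrix: list[list[str]], step: int
-- ) -> list[list[tuple[str, tuple[int, int]]]]:
--     num_rows = len(matrix)
--     num_cols = len(matrix[0])
--     # frontier of states: (current_x, current_y, path, visited, direction)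
--     frontier = [
--         (x, 0, [(matrix[0][x], (x, 0))], {(x, 0)}, "vertical")
--         for x in range(num_cols)
--     ]
--     remaining = step
--     while remaining != 0 and frontier:
--         new_frontier = []
--         for (cx, cy, path, visited, direction) in frontier:
--             if direction == "vertical":
--                 for ny in range(num_rows):
--                     if (cx, ny) not in visited:
--                         new_frontier.append(
--                             (cx, ny,
--                              path + [(matrix[ny][cx], (cx, ny))],
--                              visited | {(cx, ny)},
--                              "horizontal")
--                         )
--             else:
--                 for nx in range(num_cols):
--                     if (nx, cy) not in visited:
--                         new_frontier.append(
--                             (nx, cy,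
--                              path + [(matrix[cy][nx], (nx, cy))],
--                              visited | {(nx, cy)},
--                              "vertical")
--                         )
--         frontier = new_frontier
--         remaining -= 1
--     return [path for (_, _, path, _, _) in frontier] if remaining == 0 else []
-- ===== Notes on version B (the rewrite author's own statement) =====
-- stated objective: alternative
-- what changed: Replaces A's recursive DFS (nested explore_paths with mutable all_paths accumulator) by an iterative level-by-level frontier expansion over explicit (x, y, path, visited, direction) states, returning the frontier's paths after the step-th round.
import Mathlib
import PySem

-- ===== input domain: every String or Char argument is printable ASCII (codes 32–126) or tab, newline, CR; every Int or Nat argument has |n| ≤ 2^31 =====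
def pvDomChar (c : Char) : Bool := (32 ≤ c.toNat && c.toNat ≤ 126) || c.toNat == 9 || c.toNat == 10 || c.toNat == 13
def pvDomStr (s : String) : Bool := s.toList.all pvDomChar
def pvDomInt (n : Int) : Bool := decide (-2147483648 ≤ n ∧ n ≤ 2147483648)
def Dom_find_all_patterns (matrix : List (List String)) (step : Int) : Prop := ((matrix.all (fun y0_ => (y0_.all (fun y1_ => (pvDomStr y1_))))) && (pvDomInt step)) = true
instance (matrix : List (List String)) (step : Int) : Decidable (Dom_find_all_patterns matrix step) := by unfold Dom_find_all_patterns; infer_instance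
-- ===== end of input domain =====

-- B replaces A's recursive DFS by an iterative breadth-first frontier expansion over explicit
-- path states, an alternative decomposition of the same enumeration (equal return values proved).

-- ===== PORT A =====
-- A's recursive explore_paths; 'fuel' is only a totality guard (one unit per recursion level;
-- the top-level call passes more fuel than the recursion depth can ever reach, since each level
-- either lowers remaining toward 0 or, when remaining never hits 0, strictly grows visited
-- inside the num_rows × num_cols grid).
def pvExploreA (matrix : List (List String)) (num_rows num_cols : Int) :
    Nat → Int → Int → List (String × (Int × Int)) → PySem.Set (Int × Int) → String → Int →
    List (List (String × (Int × Int)))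
  | 0, _, _, _, _, _, _ => []
  | fuel + 1, cx, cy, path, visited, dir, rem =>
    if rem = 0 then [path]
    else if dir = "vertical" then
      (PySem.List.pyRange 0 num_rows 1).foldl (fun acc ny =>
        if PySem.Set.contains visited (cx, ny) then acc
        else acc ++ pvExploreA matrix num_rows num_cols fuel cx ny
              (path ++ [(PySem.List.pyGetD (PySem.List.pyGetD matrix ny []) cx "", (cx, ny))])
              (PySem.Set.add visited (cx, ny)) "horizontal" (rem - 1)) []
    else
      (PySem.List.pyRange 0 num_cols 1).foldl (fun acc nx =>
        if PySem.Set.contains visited (nx, cy) then acc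
        else acc ++ pvExploreA matrix num_rows num_cols fuel nx cy
              (path ++ [(PySem.List.pyGetD (PySem.List.pyGetD matrix cy []) nx "", (nx, cy))])
              (PySem.Set.add visited (nx, cy)) "vertical" (rem - 1)) []

def find_all_patterns (matrix : List (List String)) (step : Int) : List (List (String × (Int × Int))) :=
  let num_rows : Int := matrix.length
  let num_cols : Int := (matrix.headD []).length
  let fuel : Nat := step.natAbs + matrix.length * (matrix.headD []).length + 2
  (PySem.List.pyRange 0 num_cols 1).foldl (fun acc x =>
    acc ++ pvExploreA matrix num_rows num_cols fuel x 0
      [(PySem.List.pyGetD (PySem.List.pyGetD matrix 0 []) x "", (x, 0))]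
      (PySem.Set.ofList [(x, (0 : Int))]) "vertical" step) []

-- ===== PORT B =====
-- a frontier state: (current_x, current_y, path, visited, direction)
abbrev PvStateB := Int × Int × List (String × (Int × Int)) × PySem.Set (Int × Int) × String

-- children of one state, in ascending index order (the inner for-loops of Source B)
def pvExpandB (matrix : List (List String)) (num_rows num_cols : Int) (s : PvStateB) :
    List PvStateB :=
  match s with
  | (cx, cy, path, visited, dir) =>
    if dir = "vertical" then
      (PySem.List.pyRange 0 num_rows 1).foldl (fun acc ny =>
        if PySem.Set.contains visited (cx, ny) then acc
        else acc ++ [(cx, ny,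
              path ++ [(PySem.List.pyGetD (PySem.List.pyGetD matrix ny []) cx "", (cx, ny))],
              PySem.Set.add visited (cx, ny), "horizontal")]) []
    else
      (PySem.List.pyRange 0 num_cols 1).foldl (fun acc nx =>
        if PySem.Set.contains visited (nx, cy) then acc
        else acc ++ [(nx, cy,
              path ++ [(PySem.List.pyGetD (PySem.List.pyGetD matrix cy []) nx "", (nx, cy))],
              PySem.Set.add visited (nx, cy), "vertical")]) []

-- the while loop of Source B ('while remaining != 0 and frontier'); fuel is only a totality guard
def pvLoopB (matrix : List (List String)) (num_rows num_cols : Int) :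
    Nat → List PvStateB → Int → List (List (String × (Int × Int)))
  | 0, _, _ => []
  | fuel + 1, frontier, remaining =>
    if remaining ≠ 0 ∧ frontier ≠ [] then
      pvLoopB matrix num_rows num_cols fuel
        (frontier.flatMap (pvExpandB matrix num_rows num_cols)) (remaining - 1)
    else if remaining = 0 then frontier.map (fun s => s.2.2.1) else []

def find_all_patterns_alt (matrix : List (List String)) (step : Int) : List (List (String × (Int × Int))) :=
  let num_rows : Int := matrix.length
  let num_cols : Int := (matrix.headD []).length
  let fuel : Nat := step.natAbs + matrix.length * (matrix.headD []).length + 2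
  pvLoopB matrix num_rows num_cols fuel
    ((PySem.List.pyRange 0 num_cols 1).map (fun x =>
      ((x : Int), (0 : Int),
        [(PySem.List.pyGetD (PySem.List.pyGetD matrix 0 []) x "", (x, (0 : Int)))],
        PySem.Set.ofList [(x, (0 : Int))], "vertical")))
    step

-- ===== PRECONDITION & SPEC =====
-- Exactly where Python A returns: A indexes matrix[0] (IndexError on an empty matrix) and, for
-- step ≠ 0, indexes matrix[y][x] for every y and every x < len(matrix[0]) (IndexError when some
-- row is shorter than row 0).
def Pre_find_all_patterns (matrix : List (List String)) (step : Int) : Prop :=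
  matrix ≠ [] ∧ (step = 0 ∨ ∀ row ∈ matrix, (matrix.headD []).length ≤ row.length)
instance (matrix : List (List String)) (step : Int) : Decidable (Pre_find_all_patterns matrix step) := by unfold Pre_find_all_patterns; infer_instance

def pvWitness_find_all_patterns : List (List String) × Int := ([["a", "b"], ["c", "d"]], 2)

def Spec_find_all_patterns (matrix : List (List String)) (step : Int) (out : List (List (String × (Int × Int)))) : Prop := out = find_all_patterns_alt matrix step
instance (matrix : List (List String)) (step : Int) (out : List (List (String × (Int × Int)))) : Decidable (Spec_find_all_patterns matrix step out) := by unfold Spec_find_all_patterns; infer_instance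

-- ===== CLAIM (what is proved, stated in full; the proofs are below) =====
def Claim_equal_find_all_patterns : Prop := ∀ (matrix : List (List String)) (step : Int), Dom_find_all_patterns matrix step → Pre_find_all_patterns matrix step → Spec_find_all_patterns matrix step (find_all_patterns matrix step)

-- ===== LEMMAS AND PROOFS =====

-- one DFS level equals one frontier expansion: for rem ≠ 0, A's explore at fuel+1 is the
-- flatMap of A's explore at fuel over the children produced by B's expand
-- a fold that skips visited indices and appends g of the child equals flatMapping g over the
-- fold that appends the child states themselves (shared loop shape of pvExploreA / pvExpandB)
theorem pv_fold_skip {α β γ : Type} (l : List α) (p : α → Bool) (c : α → β) (g : β → List γ) :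
    l.foldl (fun acc a => if p a then acc else acc ++ g (c a)) [] =
      (l.foldl (fun acc a => if p a then acc else acc ++ [c a]) []).flatMap g := by
  rw [show (fun (acc : List γ) a => if p a then acc else acc ++ g (c a)) =
      (fun acc a => if !p a then acc ++ g (c a) else acc) from by
    funext acc a; cases p a <;> simp]
  rw [show (fun (acc : List β) a => if p a then acc else acc ++ [c a]) =
      (fun acc a => if !p a then acc ++ [c a] else acc) from by
    funext acc a; cases p a <;> simp]
  rw [PySem.List.foldl_if_eq_foldl_filter, PySem.List.foldl_append_eq_flatMap,
      PySem.List.foldl_append_if]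
  simp [List.flatMap_map]

theorem pvExplore_succ_pf (matrix : List (List String)) (num_rows num_cols : Int)
    (fuel : Nat) (cx cy : Int) (path : List (String × (Int × Int)))
    (visited : PySem.Set (Int × Int)) (dir : String) (rem : Int) (hrem : rem ≠ 0) :
    pvExploreA matrix num_rows num_cols (fuel + 1) cx cy path visited dir rem =
      (pvExpandB matrix num_rows num_cols (cx, cy, path, visited, dir)).flatMap
        (fun s => pvExploreA matrix num_rows num_cols fuel s.1 s.2.1 s.2.2.1 s.2.2.2.1
          s.2.2.2.2 (rem - 1)) := by
  simp only [pvExploreA, pvExpandB, if_neg hrem]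
  by_cases hd : dir = "vertical"
  · rw [if_pos hd, if_pos hd]
    exact pv_fold_skip (PySem.List.pyRange 0 num_rows 1)
      (fun ny => PySem.Set.contains visited (cx, ny))
      (fun ny => (cx, ny,
        path ++ [(PySem.List.pyGetD (PySem.List.pyGetD matrix ny []) cx "", (cx, ny))],
        PySem.Set.add visited (cx, ny), "horizontal"))
      (fun s => pvExploreA matrix num_rows num_cols fuel s.1 s.2.1 s.2.2.1 s.2.2.2.1
        s.2.2.2.2 (rem - 1))
  · rw [if_neg hd, if_neg hd]
    exact pv_fold_skip (PySem.List.pyRange 0 num_cols 1)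
      (fun nx => PySem.Set.contains visited (nx, cy))
      (fun nx => (nx, cy,
        path ++ [(PySem.List.pyGetD (PySem.List.pyGetD matrix cy []) nx "", (nx, cy))],
        PySem.Set.add visited (nx, cy), "vertical"))
      (fun s => pvExploreA matrix num_rows num_cols fuel s.1 s.2.1 s.2.2.1 s.2.2.2.1
        s.2.2.2.2 (rem - 1))

-- the frontier loop computes, level-synchronously, the concatenation of the DFS results
theorem pvLoop_eq_flatMap (matrix : List (List String)) (num_rows num_cols : Int) :
    ∀ (fuel : Nat) (frontier : List PvStateB) (rem : Int),
    pvLoopB matrix num_rows num_cols fuel frontier rem =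
      frontier.flatMap (fun s => pvExploreA matrix num_rows num_cols fuel s.1 s.2.1 s.2.2.1
        s.2.2.2.1 s.2.2.2.2 rem) := by
  intro fuel
  induction fuel with
  | zero => intro frontier rem; simp [pvLoopB, pvExploreA]
  | succ f ih =>
    intro frontier rem
    by_cases hrem : rem = 0
    · subst hrem
      simp [pvLoopB, pvExploreA, List.map_eq_flatMap]
    · by_cases hf : frontier = []
      · subst hf; simp [pvLoopB, hrem]
      · rw [pvLoopB]
        rw [if_pos ⟨hrem, hf⟩, ih, List.flatMap_assoc]
        congr 1
        funext s
        obtain ⟨cx, cy, path, vis, dir⟩ := s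
        exact (pvExplore_succ_pf matrix num_rows num_cols f cx cy path vis dir rem hrem).symm

-- ===== VERDICT (by name: the statement is the Claim_ definition above) =====
theorem find_all_patterns_spec : Claim_equal_find_all_patterns := by
  intro matrix step _ _
  unfold Spec_find_all_patterns find_all_patterns find_all_patterns_alt
  rw [pvLoop_eq_flatMap, List.flatMap_map, PySem.List.foldl_append_eq_flatMap]
  simp
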